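-- pv_equiv track=rewrite | github.com/CogStack/Foresight | foresight/datasets/utils.py | remove_parents_from_stream
-- ===== SOURCE A (Python) =====
-- def remove_parents_from_stream(examples, ch2parents, separator=None, separators=None):
--     for i in range(len(examples['stream'])):
--         stream = examples['stream'][i]
--         parents = set()
--         new_stream = []
--
--         for ent in stream:
--             tkn = ent['token']
--
--             if (separator is not None and tkn == separator) or (separators is not None and tkn in separators):
--                 # This means we are removing parents only inside of one bucket
--                 parents = set()
--
--             if tkn in ch2parents:
--                 # Add only if not in parents
--                 if tkn not in parents:
--                     new_stream.append(ent)
--                 # Update parents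
--                 parents.update(ch2parents[tkn])
--             else:
--                 new_stream.append(ent)
--
--         examples['stream'][i] = new_stream
--
--     return examples
-- ===== SOURCE B (Python) =====
-- # B: bucket decomposition — split each stream at separator tokens, filter each
-- # bucket against a fresh parents set, and rebuild examples['stream'] wholesale.
-- # (Like A, mutates examples['stream'] in place; return-value equivalent.)
-- def remove_parents_from_stream(examples, ch2parents, separator=None, separators=None):
--     def is_sep(tkn):
--         return (separator is not None and tkn == separator) or \
--                (separators is not None and tkn in separators)
--
--     new_streams = []
--     for stream in examples['stream']:
--         # split into buckets: a separator token starts a new bucket (and leads it)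
--         buckets = []
--         cur = []
--         for ent in stream:
--             if is_sep(ent['token']) and cur:
--                 buckets.append(cur)
--                 cur = [ent]
--             else:
--                 cur.append(ent)
--         buckets.append(cur)
--         # filter each bucket independently with a fresh parents set
--         out = []
--         for bucket in buckets:
--             parents = set()
--             for ent in bucket:
--                 tkn = ent['token']
--                 if tkn in ch2parents:
--                     if tkn not in parents:
--                         out.append(ent)
--                     parents.update(ch2parents[tkn])
--                 else:
--                     out.append(ent)
--         new_streams.append(out)
--     examples['stream'] = new_streams
--     return examples
-- ===== Notes on version B (the rewrite author's own statement) =====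
-- stated objective: alternative
-- what changed: B first splits each stream into separator-delimited buckets and then filters each bucket against a fresh parents set, and rebuilds examples['stream'] wholesale, instead of A's single pass with an inline parents reset and per-index list assignment.
-- outside the precondition, e.g. on remove_parents_from_stream({}, {}, None, None): A raises KeyError, B raises KeyError; on remove_parents_from_stream({'stream': [[{}]]}, {}, None, None): A raises KeyError, B raises KeyError
import Mathlib
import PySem

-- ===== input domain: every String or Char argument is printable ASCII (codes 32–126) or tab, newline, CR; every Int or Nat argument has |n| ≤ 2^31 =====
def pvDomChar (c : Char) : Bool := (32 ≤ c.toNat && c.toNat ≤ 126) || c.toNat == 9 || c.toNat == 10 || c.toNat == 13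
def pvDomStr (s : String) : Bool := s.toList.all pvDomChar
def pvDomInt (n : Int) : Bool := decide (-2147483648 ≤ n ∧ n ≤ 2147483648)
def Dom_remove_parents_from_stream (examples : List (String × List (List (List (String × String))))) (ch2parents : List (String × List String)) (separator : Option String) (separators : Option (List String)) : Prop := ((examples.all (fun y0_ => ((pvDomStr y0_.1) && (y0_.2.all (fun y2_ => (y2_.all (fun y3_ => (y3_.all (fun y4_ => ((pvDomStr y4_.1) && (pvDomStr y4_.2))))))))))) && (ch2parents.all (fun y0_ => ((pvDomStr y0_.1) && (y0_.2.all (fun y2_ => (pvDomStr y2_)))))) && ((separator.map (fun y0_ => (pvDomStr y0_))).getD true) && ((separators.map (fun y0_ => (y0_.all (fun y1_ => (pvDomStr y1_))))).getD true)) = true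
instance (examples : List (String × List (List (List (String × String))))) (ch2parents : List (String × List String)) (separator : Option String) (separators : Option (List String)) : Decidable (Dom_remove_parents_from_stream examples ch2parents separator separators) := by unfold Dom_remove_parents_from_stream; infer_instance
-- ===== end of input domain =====

-- B re-decomposes A's single pass: it splits each stream into separator-delimited
-- buckets and filters each bucket against a fresh parents set ('alternative').
-- Both Pythons mutate examples['stream'] in place; the equivalence proved here is
-- about the RETURN value only.

-- ===== PORT A =====
-- shared tiny helpers: ent['token'] and A's inline separator test (Source B's is_sep)
def pvToken (ent : List (String × String)) : String := (PySem.Dict.mk ent).getD "token" ""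

def pvIsSep (separator : Option String) (separators : Option (List String)) (tkn : String) : Bool :=
  (match separator with | some s => tkn == s | none => false)
  || (match separators with | some ss => ss.contains tkn | none => false)

-- body of A's inner 'for ent in stream' loop (state = (parents, new_stream))
def pvStepA (ch2parents : List (String × List String)) (separator : Option String) (separators : Option (List String)) (st : PySem.Set String × List (List (String × String))) (ent : List (String × String)) : PySem.Set String × List (List (String × String)) :=
  let tkn := pvToken ent
  let parents := if pvIsSep separator separators tkn then (PySem.Set.empty : PySem.Set String) else st.1
  match (PySem.Dict.mk ch2parents).get? tkn with
  | some ps => (PySem.Set.update parents ps, if PySem.Set.contains parents tkn then st.2 else st.2 ++ [ent])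
  | none => (parents, st.2 ++ [ent])

def remove_parents_from_stream (examples : List (String × List (List (List (String × String))))) (ch2parents : List (String × List String)) (separator : Option String) (separators : Option (List String)) : List (String × List (List (List (String × String)))) :=
  let exd := PySem.Dict.mk examples
  ((PySem.List.pyRange 0 ((exd.getD "stream" []).length : Int) 1).foldl (fun ex i =>
      let streams := ex.getD "stream" []
      let stream := PySem.List.pyGetD streams i []
      let new_stream := (stream.foldl (pvStepA ch2parents separator separators) (PySem.Set.empty, [])).2
      ex.insert "stream" (PySem.List.pySetD streams i new_stream)) exd).items

-- ===== PORT B =====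
-- body of Source B's bucket-splitting loop (state = (buckets, cur))
def pvBucketStep (separator : Option String) (separators : Option (List String)) (st : List (List (List (String × String))) × List (List (String × String))) (ent : List (String × String)) : List (List (List (String × String))) × List (List (String × String)) :=
  if pvIsSep separator separators (pvToken ent) && !st.2.isEmpty
  then (st.1 ++ [st.2], [ent])
  else (st.1, st.2 ++ [ent])

def pvBucketize (separator : Option String) (separators : Option (List String)) (stream : List (List (String × String))) : List (List (List (String × String))) :=
  let st := stream.foldl (pvBucketStep separator separators) ([], [])
  st.1 ++ [st.2]

-- body of Source B's per-bucket 'for ent in bucket' loop (no separator test)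
def pvStepB (ch2parents : List (String × List String)) (st : PySem.Set String × List (List (String × String))) (ent : List (String × String)) : PySem.Set String × List (List (String × String)) :=
  let tkn := pvToken ent
  match (PySem.Dict.mk ch2parents).get? tkn with
  | some ps => (PySem.Set.update st.1 ps, if PySem.Set.contains st.1 tkn then st.2 else st.2 ++ [ent])
  | none => (st.1, st.2 ++ [ent])

def pvFilterStream (ch2parents : List (String × List String)) (separator : Option String) (separators : Option (List String)) (stream : List (List (String × String))) : List (List (String × String)) :=
  (pvBucketize separator separators stream).foldl
    (fun out b => (b.foldl (pvStepB ch2parents) (PySem.Set.empty, out)).2) []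

def remove_parents_from_stream_alt (examples : List (String × List (List (List (String × String))))) (ch2parents : List (String × List String)) (separator : Option String) (separators : Option (List String)) : List (String × List (List (List (String × String)))) :=
  let exd := PySem.Dict.mk examples
  (exd.insert "stream" ((exd.getD "stream" []).map (pvFilterStream ch2parents separator separators))).items

-- ===== PRECONDITION & SPEC =====
-- Pre_ excludes: (a) inputs without a "stream" key and entities without a "token"
-- key, on which the Python A raises KeyError; (b) assoc lists whose 'examples'
-- keys are not distinct, which do not represent a Python dict at all.
def Pre_remove_parents_from_stream (examples : List (String × List (List (List (String × String))))) (ch2parents : List (String × List String)) (separator : Option String) (separators : Option (List String)) : Prop :=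
  ((PySem.Dict.mk examples).contains "stream"
    && ((PySem.Dict.mk examples).getD "stream" []).all (fun s => s.all (fun e => (PySem.Dict.mk e).contains "token"))) = true
  ∧ (examples.map Prod.fst).Nodup
instance (examples : List (String × List (List (List (String × String))))) (ch2parents : List (String × List String)) (separator : Option String) (separators : Option (List String)) : Decidable (Pre_remove_parents_from_stream examples ch2parents separator separators) := by unfold Pre_remove_parents_from_stream; infer_instance

def pvWitness_remove_parents_from_stream : (List (String × List (List (List (String × String))))) × (List (String × List String)) × Option String × Option (List String) :=
  ([("stream", [[[("token", "a")]]])], [("a", ["p"])], some "s", none)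

def Spec_remove_parents_from_stream (examples : List (String × List (List (List (String × String))))) (ch2parents : List (String × List String)) (separator : Option String) (separators : Option (List String)) (out : List (String × List (List (List (String × String))))) : Prop := out = remove_parents_from_stream_alt examples ch2parents separator separators
instance (examples : List (String × List (List (List (String × String))))) (ch2parents : List (String × List String)) (separator : Option String) (separators : Option (List String)) (out : List (String × List (List (List (String × String))))) : Decidable (Spec_remove_parents_from_stream examples ch2parents separator separators out) := by unfold Spec_remove_parents_from_stream; infer_instance

-- ===== CLAIM (what is proved, stated in full; the proofs are below) =====
def Claim_equal_remove_parents_from_stream : Prop := ∀ (examples : List (String × List (List (List (String × String))))) (ch2parents : List (String × List String)) (separator : Option String) (separators : Option (List String)), Dom_remove_parents_from_stream examples ch2parents separator separators → Pre_remove_parents_from_stream examples ch2parents separator separators → Spec_remove_parents_from_stream examples ch2parents separator separators (remove_parents_from_stream examples ch2parents separator separators)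

-- ===== LEMMAS AND PROOFS =====

-- proof-side abbreviations for B's bucket-consumption fold
def pvProc (ch : List (String × List String)) (out : List (List (String × String))) (b : List (List (String × String))) : List (List (String × String)) :=
  (b.foldl (pvStepB ch) (PySem.Set.empty, out)).2

def pvDone (ch : List (String × List String)) (buckets : List (List (List (String × String)))) : List (List (String × String)) :=
  buckets.foldl (pvProc ch) []

-- A's loop body = B's bucket-loop body, applied to a possibly-reset state
theorem pvStepA_eq (ch : List (String × List String)) (sep : Option String) (seps : Option (List String)) (st : PySem.Set String × List (List (String × String))) (ent : List (String × String)) :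
    pvStepA ch sep seps st ent
      = if pvIsSep sep seps (pvToken ent)
        then pvStepB ch (PySem.Set.empty, st.2) ent
        else pvStepB ch st ent := by
  unfold pvStepA pvStepB
  split_ifs with h <;> simp [h]

-- one step of A from the state encoded by (buckets, cur) lands in the state
-- encoded by pvBucketStep (buckets, cur) ent
theorem pvStep_bridge (ch : List (String × List String)) (sep : Option String) (seps : Option (List String)) (buckets : List (List (List (String × String)))) (cur : List (List (String × String))) (ent : List (String × String)) :
    pvStepA ch sep seps (cur.foldl (pvStepB ch) (PySem.Set.empty, pvDone ch buckets)) ent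
      = (pvBucketStep sep seps (buckets, cur) ent).2.foldl (pvStepB ch)
          (PySem.Set.empty, pvDone ch (pvBucketStep sep seps (buckets, cur) ent).1) := by
  rw [pvStepA_eq]
  by_cases h : pvIsSep sep seps (pvToken ent) = true
  · rw [if_pos h]
    by_cases hcur : cur = []
    · subst hcur
      simp [pvBucketStep, h]
    · have hb : pvBucketStep sep seps (buckets, cur) ent = (buckets ++ [cur], [ent]) := by
        simp [pvBucketStep, h, hcur]
      rw [hb]
      have hdone : pvDone ch (buckets ++ [cur]) = (cur.foldl (pvStepB ch) (PySem.Set.empty, pvDone ch buckets)).2 := by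
        simp [pvDone, List.foldl_append, pvProc]
      simp [hdone]
  · rw [if_neg h]
    have hb : pvBucketStep sep seps (buckets, cur) ent = (buckets, cur ++ [ent]) := by
      simp [pvBucketStep, h]
    rw [hb]
    simp [List.foldl_append]

-- core invariant of the two traversals
theorem pvInner_inv (ch : List (String × List String)) (sep : Option String) (seps : Option (List String)) :
    ∀ (stream : List (List (String × String))) (buckets : List (List (List (String × String)))) (cur : List (List (String × String))),
      stream.foldl (pvStepA ch sep seps)
        (cur.foldl (pvStepB ch) (PySem.Set.empty, pvDone ch buckets))
      = (stream.foldl (pvBucketStep sep seps) (buckets, cur)).2.foldl (pvStepB ch)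
          (PySem.Set.empty, pvDone ch (stream.foldl (pvBucketStep sep seps) (buckets, cur)).1) := by
  intro stream
  induction stream with
  | nil => intro buckets cur; rfl
  | cons ent rest ih =>
    intro buckets cur
    simp only [List.foldl_cons]
    rw [pvStep_bridge]
    have := ih (pvBucketStep sep seps (buckets, cur) ent).1 (pvBucketStep sep seps (buckets, cur) ent).2
    simpa using this

-- per-stream equality: A's inner loop output = B's bucketized output
theorem pvFilter_eq (ch : List (String × List String)) (sep : Option String) (seps : Option (List String)) (stream : List (List (String × String))) :
    (stream.foldl (pvStepA ch sep seps) (PySem.Set.empty, [])).2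
      = pvFilterStream ch sep seps stream := by
  have h := pvInner_inv ch sep seps stream [] []
  simp only [List.foldl_nil] at h
  have h0 : pvDone ch [] = [] := rfl
  rw [h0] at h
  rw [h]
  unfold pvFilterStream pvBucketize
  have : (fun (out : List (List (String × String))) (b : List (List (String × String))) => (b.foldl (pvStepB ch) (PySem.Set.empty, out)).2) = pvProc ch := rfl
  rw [this]
  simp [List.foldl_append, pvProc, pvDone]

-- first-match association lists with distinct keys: overwriting a key with the
-- value it already has is the identity (on the underlying items)
theorem pvMap_overwrite_eq {κ ν : Type} [BEq κ] [LawfulBEq κ] (k : κ) (v : ν) :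
    ∀ (l : List (κ × ν)), (l.map Prod.fst).Nodup → (PySem.Dict.mk l).get? k = some v →
      l.map (fun p => if p.1 == k then (k, v) else p) = l := by
  intro l
  induction l with
  | nil => intro _ h; simp [PySem.Dict.get?] at h
  | cons a t ih =>
    intro hnd hget
    rw [PySem.Dict.get?_mk_cons] at hget
    simp only [List.map_cons, List.nodup_cons] at hnd
    rw [List.map_cons]
    by_cases hak : (a.1 == k) = true
    · have hk : a.1 = k := by simpa using hak
      have hv : a.2 = v := by simpa [hak] using hget
      have htail : t.map (fun p => if (p.1 == k) = true then (k, v) else p) = t := by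
        have hcg : ∀ p ∈ t, (if (p.1 == k) = true then (k, v) else p) = id p := by
          intro p hp
          have hpk : p.1 ≠ k := by
            intro hpk
            exact hnd.1 (by rw [hk, ← hpk]; exact List.mem_map_of_mem hp)
          simp [hpk]
        rw [List.map_congr_left hcg, List.map_id]
      rw [htail]
      simp [← hk, ← hv]
    · have htail := ih hnd.2 (by simpa [hak] using hget)
      rw [htail]
      simp [hak]

theorem pvInsert_get?_eq {κ ν : Type} [BEq κ] [LawfulBEq κ] (d : PySem.Dict κ ν) (k : κ) (v : ν) (hnd : d.keys.Nodup) (h : d.get? k = some v) : d.insert k v = d := by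
  have hcont : d.contains k = true := by
    rw [PySem.Dict.contains_eq_isSome_get?, h]; rfl
  apply PySem.Dict.ext
  rw [PySem.Dict.items_insert_of_contains d v hcont]
  exact pvMap_overwrite_eq k v d.items (by simpa [PySem.Dict.keys] using hnd) h

-- the dict-threading loop is a single insert of the list-threading loop
theorem pvDictFold (F : List (List (List (String × String))) → Int → List (List (List (String × String)))) :
    ∀ (is : List Int) (d : PySem.Dict String (List (List (List (String × String))))),
      d.insert "stream" (d.getD "stream" []) = d →
      is.foldl (fun ex i => PySem.Dict.insert ex "stream" (F (ex.getD "stream" []) i)) d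
        = d.insert "stream" (is.foldl F (d.getD "stream" [])) := by
  intro is
  induction is with
  | nil => intro d hd; simp [List.foldl_nil, hd]
  | cons i rest ih =>
    intro d hd
    simp only [List.foldl_cons]
    rw [ih (d.insert "stream" (F (d.getD "stream" []) i)) (by rw [PySem.Dict.insert_insert_self, PySem.Dict.getD_insert_self])]
    rw [PySem.Dict.getD_insert_self, PySem.Dict.insert_insert_self]

-- the index loop 'xs[i] = f(xs[i])' over range(len(xs)) is a map
theorem pvSetFold (f : List (List (String × String)) → List (List (String × String))) :
    ∀ (back front : List (List (List (String × String)))),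
      (PySem.List.pyRange (front.length : Int) ((front.length : Int) + (back.length : Int)) 1).foldl
        (fun l i => PySem.List.pySetD l i (f (PySem.List.pyGetD l i []))) (front ++ back)
      = front ++ back.map f := by
  intro back
  induction back with
  | nil => intro front; simp [PySem.List.pyRange_one_eq_nil]
  | cons b bs ih =>
    intro front
    have hcons : PySem.List.pyRange (front.length : Int) ((front.length : Int) + ((b :: bs).length : Int)) 1
        = (front.length : Int) :: PySem.List.pyRange ((front.length : Int) + 1) ((front.length : Int) + ((b :: bs).length : Int)) 1 := by
      apply PySem.List.pyRange_one_cons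
      have : (b :: bs).length = bs.length + 1 := rfl
      omega
    rw [hcons]
    simp only [List.foldl_cons]
    have hget : PySem.List.pyGetD (front ++ b :: bs) (front.length : Int) [] = b := by
      rw [PySem.List.pyGetD_natCast]
      simp [List.getD]
    have hset : PySem.List.pySetD (front ++ b :: bs) (front.length : Int) (f b) = (front ++ [f b]) ++ bs := by
      rw [PySem.List.pySetD_natCast]
      rw [List.set_append_right _ _ (le_refl _)]
      simp
    rw [hget, hset]
    have := ih (front ++ [f b])
    have hlen : ((front ++ [f b]).length : Int) = (front.length : Int) + 1 := by simp
    rw [hlen] at this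
    have harg : ((front.length : Int) + 1 + (bs.length : Int)) = (front.length : Int) + ((b :: bs).length : Int) := by
      have : (b :: bs).length = bs.length + 1 := rfl
      omega
    rw [harg] at this
    rw [this]
    simp

-- ===== VERDICT (by name: the statement is the Claim_ definition above) =====
theorem remove_parents_from_stream_spec : Claim_equal_remove_parents_from_stream := by
  intro examples ch2parents separator separators _hdom hpre
  unfold Spec_remove_parents_from_stream
  obtain ⟨hb, hnd⟩ := hpre
  have hc : (PySem.Dict.mk examples).contains "stream" = true := by
    have hb2 := hb
    rw [Bool.and_eq_true] at hb2
    exact hb2.1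
  obtain ⟨s0, hget⟩ : ∃ v, (PySem.Dict.mk examples).get? "stream" = some v := by
    rw [PySem.Dict.contains_eq_isSome_get?] at hc
    exact Option.isSome_iff_exists.mp hc
  have hgetD : (PySem.Dict.mk examples).getD "stream" [] = s0 :=
    PySem.Dict.getD_of_get?_eq_some _ _ hget
  have hins : (PySem.Dict.mk examples).insert "stream" s0 = PySem.Dict.mk examples :=
    pvInsert_get?_eq _ _ _ (by simpa [PySem.Dict.keys] using hnd) hget
  unfold remove_parents_from_stream remove_parents_from_stream_alt
  simp only [hgetD]
  have hdf := pvDictFold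
      (fun l i => PySem.List.pySetD l i (List.foldl (pvStepA ch2parents separator separators) (PySem.Set.empty, []) (PySem.List.pyGetD l i [])).2)
      (PySem.List.pyRange 0 (s0.length : Int) 1) (PySem.Dict.mk examples) (by rw [hgetD, hins])
  rw [hdf]
  rw [hgetD]
  have hsf := pvSetFold (fun s => (s.foldl (pvStepA ch2parents separator separators) (PySem.Set.empty, [])).2) s0 []
  simp only [List.length_nil, Nat.cast_zero, zero_add, List.nil_append] at hsf
  rw [hsf]
  congr 2
  apply List.map_congr_left
  intro s _
  exact pvFilter_eq ch2parents separator separators s
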